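-- pv_equiv track=rewrite | github.com/JaimeFRF/vcom-proj | tests/test_implementation.py | compare_matrix_with_result
-- ===== SOURCE A (Python) =====
-- def compare_matrix_with_result(user, solution):
--     TP = FP = FN = TN = 0
--
--     for i in range(len(user)):
--         for j in range(len(user[i])):
--             u, s = user[i][j], solution[i][j]
--
--             if s == 0 and u == 0:
--                 TN += 1
--             elif s != 0 and u != 0:
--                 TP += 1
--             elif s != 0 and u == 0:
--                 FN += 1
--             elif s == 0 and u != 0:
--                 FP += 1
--
--     return TP, FP, FN, TN
-- ===== SOURCE B (Python) =====
-- def compare_matrix_with_result(user, solution):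
--     cells = [(u, s) for urow, srow in zip(user, solution)
--                     for u, s in zip(urow, srow)]
--     total = len(cells)
--     pu = sum(1 for u, _ in cells if u != 0)
--     ps = sum(1 for _, s in cells if s != 0)
--     tp = sum(1 for u, s in cells if u != 0 and s != 0)
--     return tp, pu - tp, ps - tp, total - pu - ps + tp
-- ===== Notes on version B (the rewrite author's own statement) =====
-- stated objective: alternative
-- what changed: Replaces A's per-cell four-way if/elif classification by staged passes: flatten the zipped matrices once, count three marginals (nonzero user, nonzero solution, both nonzero), and derive FP/FN/TN by inclusion-exclusion.
import Mathlib
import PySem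

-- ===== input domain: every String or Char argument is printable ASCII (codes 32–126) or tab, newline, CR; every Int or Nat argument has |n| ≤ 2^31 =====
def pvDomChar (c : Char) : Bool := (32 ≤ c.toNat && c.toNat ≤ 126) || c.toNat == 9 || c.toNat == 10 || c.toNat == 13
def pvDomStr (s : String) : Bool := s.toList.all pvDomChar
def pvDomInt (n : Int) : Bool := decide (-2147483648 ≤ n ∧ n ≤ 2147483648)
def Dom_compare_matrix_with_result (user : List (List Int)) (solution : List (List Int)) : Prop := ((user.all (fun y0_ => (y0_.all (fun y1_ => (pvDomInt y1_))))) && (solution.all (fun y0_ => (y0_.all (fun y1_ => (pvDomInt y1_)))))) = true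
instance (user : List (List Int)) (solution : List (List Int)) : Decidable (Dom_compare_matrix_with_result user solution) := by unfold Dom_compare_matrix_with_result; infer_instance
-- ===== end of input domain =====

-- B flattens the zipped matrices once, counts three marginals in staged passes
-- (nonzero user, nonzero solution, both) and derives FP/FN/TN by inclusion-exclusion;
-- objective: alternative.


-- ===== PORT A =====
-- the body of A's innermost iteration: the if/elif chain updating (TP, FP, FN, TN)
def pvCell (acc : Int × Int × Int × Int) (u s : Int) : Int × Int × Int × Int :=
  let (TP, FP, FN, TN) := acc
  if s = 0 ∧ u = 0 then (TP, FP, FN, TN + 1)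
  else if s ≠ 0 ∧ u ≠ 0 then (TP + 1, FP, FN, TN)
  else if s ≠ 0 ∧ u = 0 then (TP, FP, FN + 1, TN)
  else if s = 0 ∧ u ≠ 0 then (TP, FP + 1, FN, TN)
  else acc

def compare_matrix_with_result (user : List (List Int)) (solution : List (List Int)) : Int × Int × Int × Int :=
  (PySem.List.pyRange 0 user.length 1).foldl
    (fun acc i =>
      (PySem.List.pyRange 0 (PySem.List.pyGetD user i []).length 1).foldl
        (fun acc2 j =>
          pvCell acc2 (PySem.List.pyGetD (PySem.List.pyGetD user i []) j 0)
                      (PySem.List.pyGetD (PySem.List.pyGetD solution i []) j 0))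
        acc)
    (0, 0, 0, 0)

-- ===== PORT B =====
def compare_matrix_with_result_alt (user : List (List Int)) (solution : List (List Int)) : Int × Int × Int × Int :=
  let cells := (user.zip solution).flatMap (fun rs => rs.1.zip rs.2)
  let total : Int := cells.length
  let pu : Int := cells.countP (fun c => decide (c.1 ≠ 0))
  let ps : Int := cells.countP (fun c => decide (c.2 ≠ 0))
  let tp : Int := cells.countP (fun c => decide (c.1 ≠ 0) && decide (c.2 ≠ 0))
  (tp, pu - tp, ps - tp, total - pu - ps + tp)

-- ===== PRECONDITION & SPEC =====
-- A raises IndexError when some nonempty row user[i] has no row solution[i] or a shorter one; exactly those inputs are excluded.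
def Pre_compare_matrix_with_result (user : List (List Int)) (solution : List (List Int)) : Prop :=
  ∀ i ∈ List.range user.length, user.getD i [] ≠ [] →
    i < solution.length ∧ (user.getD i []).length ≤ (solution.getD i []).length
instance (user : List (List Int)) (solution : List (List Int)) : Decidable (Pre_compare_matrix_with_result user solution) := by unfold Pre_compare_matrix_with_result; infer_instance

def pvWitness_compare_matrix_with_result : List (List Int) × List (List Int) := ([[1, 0], [0]], [[1, 1], [2]])

def Spec_compare_matrix_with_result (user : List (List Int)) (solution : List (List Int)) (out : Int × Int × Int × Int) : Prop := out = compare_matrix_with_result_alt user solution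
instance (user : List (List Int)) (solution : List (List Int)) (out : Int × Int × Int × Int) : Decidable (Spec_compare_matrix_with_result user solution out) := by unfold Spec_compare_matrix_with_result; infer_instance

-- ===== CLAIM (what is proved, stated in full; the proofs are below) =====
def Claim_equal_compare_matrix_with_result : Prop := ∀ (user : List (List Int)) (solution : List (List Int)), Dom_compare_matrix_with_result user solution → Pre_compare_matrix_with_result user solution → Spec_compare_matrix_with_result user solution (compare_matrix_with_result user solution)

-- ===== LEMMAS AND PROOFS =====

-- indexing two lists in parallel over the range of the shorter length IS zipping them
theorem pv_map_range_zip {α β : Type} (xs : List α) (ys : List β) (dx : α) (dy : β)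
    (n : Nat) (hn : n = min xs.length ys.length) :
    (PySem.List.pyRange 0 (n : Int) 1).map
      (fun i => (PySem.List.pyGetD xs i dx, PySem.List.pyGetD ys i dy)) = xs.zip ys := by
  apply List.ext_getElem
  · simp [PySem.List.length_pyRange_one, hn]; omega
  · intro k h1 h2
    have hk : k < n := by simpa [PySem.List.length_pyRange_one] using h1
    have hx : k < xs.length := by omega
    have hy : k < ys.length := by omega
    simp only [List.getElem_map, PySem.List.getElem_pyRange_one, zero_add, List.getElem_zip]
    rw [PySem.List.pyGetD_eq_getElem xs dx (by positivity) (by exact_mod_cast hx),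
        PySem.List.pyGetD_eq_getElem ys dy (by positivity) (by exact_mod_cast hy)]
    simp

-- a foldl whose step folds over a generated list is a foldl over the flatMap
theorem pv_foldl_foldl_flatMap {α β γ : Type} (l : List α) (g : α → List β)
    (f : γ → β → γ) (init : γ) :
    l.foldl (fun acc x => (g x).foldl f acc) init = (l.flatMap g).foldl f init := by
  induction l generalizing init with
  | nil => rfl
  | cons x t ih => simp [List.flatMap_cons, List.foldl_append, ih]

-- A's if/elif chain folded over cell pairs yields B's inclusion-exclusion expressions
theorem pv_cellfold (l : List (Int × Int)) (a b c d : Int) :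
    l.foldl (fun acc us => pvCell acc us.1 us.2) (a, b, c, d) =
      (a + (l.countP (fun c => decide (c.1 ≠ 0) && decide (c.2 ≠ 0)) : Int),
       b + ((l.countP (fun c => decide (c.1 ≠ 0)) : Int)
              - (l.countP (fun c => decide (c.1 ≠ 0) && decide (c.2 ≠ 0)) : Int)),
       c + ((l.countP (fun c => decide (c.2 ≠ 0)) : Int)
              - (l.countP (fun c => decide (c.1 ≠ 0) && decide (c.2 ≠ 0)) : Int)),
       d + ((l.length : Int) - (l.countP (fun c => decide (c.1 ≠ 0)) : Int)
              - (l.countP (fun c => decide (c.2 ≠ 0)) : Int)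
              + (l.countP (fun c => decide (c.1 ≠ 0) && decide (c.2 ≠ 0)) : Int))) := by
  induction l generalizing a b c d with
  | nil => simp
  | cons us t ih =>
    obtain ⟨u, s⟩ := us
    rw [List.foldl_cons]
    by_cases hs : s = 0 <;> by_cases hu : u = 0
    · have hc : pvCell (a, b, c, d) u s = (a, b, c, d + 1) := by simp [pvCell, hs, hu]
      rw [hc, ih]; simp [hs, hu, Prod.ext_iff]; omega
    · have hc : pvCell (a, b, c, d) u s = (a, b + 1, c, d) := by simp [pvCell, hs, hu]
      rw [hc, ih]; simp [hs, hu, Prod.ext_iff]; omega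
    · have hc : pvCell (a, b, c, d) u s = (a, b, c + 1, d) := by simp [pvCell, hs, hu]
      rw [hc, ih]; simp [hs, hu, Prod.ext_iff]; omega
    · have hc : pvCell (a, b, c, d) u s = (a + 1, b, c, d) := by simp [pvCell, hs, hu]
      rw [hc, ih]; simp [hs, hu, Prod.ext_iff]; omega

theorem compare_matrix_with_result_spec_aux (user solution : List (List Int))
    (hpre : Pre_compare_matrix_with_result user solution) :
    compare_matrix_with_result user solution = compare_matrix_with_result_alt user solution := by
  unfold compare_matrix_with_result compare_matrix_with_result_alt
  -- turn each inner index fold into a fold over the zipped row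
  have houter :
      (PySem.List.pyRange 0 (user.length : Int) 1).foldl
        (fun acc i =>
          (PySem.List.pyRange 0 ((PySem.List.pyGetD user i []).length : Int) 1).foldl
            (fun acc2 j =>
              pvCell acc2 (PySem.List.pyGetD (PySem.List.pyGetD user i []) j 0)
                          (PySem.List.pyGetD (PySem.List.pyGetD solution i []) j 0)) acc)
        ((0 : Int), (0 : Int), (0 : Int), (0 : Int))
      = (PySem.List.pyRange 0 (user.length : Int) 1).foldl
          (fun acc i =>
            (((fun i => (PySem.List.pyGetD user i [], PySem.List.pyGetD solution i [])) i).1.zip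
              ((fun i => (PySem.List.pyGetD user i [], PySem.List.pyGetD solution i [])) i).2).foldl
              (fun acc2 us => pvCell acc2 us.1 us.2) acc)
          ((0 : Int), (0 : Int), (0 : Int), (0 : Int)) := by
    apply PySem.List.foldl_congr_mem
    intro acc i hi
    rcases (PySem.List.mem_pyRange_one).1 hi with ⟨h0, hlt⟩
    have hiN : i.toNat < user.length := by omega
    have hgu : PySem.List.pyGetD user i [] = user.getD i.toNat [] := by
      rw [PySem.List.pyGetD_eq_getElem user [] h0 hlt]
      simp [List.getD, hiN]
    by_cases hrow : user.getD i.toNat [] = []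
    · simp only [hgu, hrow]
      simp [PySem.List.pyRange_one_eq_nil]
    · obtain ⟨hilen, hle⟩ := hpre i.toNat (by simpa using hiN) hrow
      have hgs : PySem.List.pyGetD solution i [] = solution.getD i.toNat [] := by
        rw [PySem.List.pyGetD_eq_getElem solution [] h0 (by omega)]
        simp [List.getD, hilen]
      simp only [hgu, hgs]
      rw [← pv_map_range_zip (user.getD i.toNat []) (solution.getD i.toNat []) 0 0
            (user.getD i.toNat []).length (by omega)]
      rw [List.foldl_map]
  rw [houter]
  -- rewrite the outer fold as a fold over the flattened cell-pair list
  have hform :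
      (PySem.List.pyRange 0 (user.length : Int) 1).foldl
        (fun acc i =>
          (((fun i => (PySem.List.pyGetD user i [], PySem.List.pyGetD solution i [])) i).1.zip
            ((fun i => (PySem.List.pyGetD user i [], PySem.List.pyGetD solution i [])) i).2).foldl
            (fun acc2 us => pvCell acc2 us.1 us.2) acc)
        ((0 : Int), (0 : Int), (0 : Int), (0 : Int))
      = (((PySem.List.pyRange 0 (user.length : Int) 1).map
            (fun i => (PySem.List.pyGetD user i [], PySem.List.pyGetD solution i []))).flatMap
            (fun rs => rs.1.zip rs.2)).foldl
          (fun acc2 us => pvCell acc2 us.1 us.2) ((0 : Int), (0 : Int), (0 : Int), (0 : Int)) := by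
    rw [pv_foldl_foldl_flatMap, List.flatMap_map]
  rw [hform]
  -- the flattened list agrees with the one zip builds: trailing rows past solution are empty by Pre_
  have hM : ((PySem.List.pyRange 0 (user.length : Int) 1).map
        (fun i => (PySem.List.pyGetD user i [], PySem.List.pyGetD solution i []))).flatMap
        (fun rs => rs.1.zip rs.2)
      = (user.zip solution).flatMap (fun rs => rs.1.zip rs.2) := by
    by_cases hlen : user.length ≤ solution.length
    · rw [pv_map_range_zip user solution [] [] user.length (by omega)]
    · rw [PySem.List.pyRange_one_append 0 (solution.length : Int) (user.length : Int)
            (by positivity) (by omega)]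
      rw [List.map_append, List.flatMap_append]
      rw [pv_map_range_zip user solution [] [] solution.length (by omega)]
      have htail : ((PySem.List.pyRange (solution.length : Int) (user.length : Int) 1).map
          (fun i => (PySem.List.pyGetD user i [], PySem.List.pyGetD solution i []))).flatMap
          (fun rs => rs.1.zip rs.2) = [] := by
        rw [List.flatMap_map]
        apply List.flatMap_eq_nil_iff.2
        intro i hi
        rcases (PySem.List.mem_pyRange_one).1 hi with ⟨h0, hlt⟩
        have hiN : i.toNat < user.length := by omega
        have hgu : PySem.List.pyGetD user i [] = user.getD i.toNat [] := by
          rw [PySem.List.pyGetD_eq_getElem user [] (by omega) hlt]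
          simp [List.getD, hiN]
        by_cases hrow : user.getD i.toNat [] = []
        · rw [hgu, hrow]; simp
        · exact absurd ((hpre i.toNat (by simpa using hiN) hrow).1) (by omega)
      rw [htail, List.append_nil]
  rw [hM, pv_cellfold]
  simp

-- ===== VERDICT (by name: the statement is the Claim_ definition above) =====
theorem compare_matrix_with_result_spec : Claim_equal_compare_matrix_with_result := by
  intro user solution _ hpre
  exact compare_matrix_with_result_spec_aux user solution hpre
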